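-- pv_equiv track=rewrite | github.com/algorithm-studyy/algorithm | jiwon/number_partner.py | solution
-- ===== SOURCE A (Python) =====
-- def get_dictionary(nums):
--     dic = {}
--     for num in nums:
--         if dic.get(num):
--             dic[num] += 1
--         else:
--             dic[num] = 1
--     return dic
--
-- def solution(X, Y):
--     answer = []
--     dic_x = get_dictionary(X)
--     dic_y = get_dictionary(Y)
--     answer_set = set()
--     for x in dic_x.keys():
--         if dic_y.get(x) and dic_y[x] > 0:
--             answer.extend(min(dic_y[x], dic_x[x]) * [x])
--             answer_set.add(x)
--     if not answer:
--         return '-1'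
--     if len(answer_set) == 1 and list(answer_set)[0] == '0':
--         return '0'
--     answer = ''.join(sorted(answer, reverse=True))
--     return answer
-- ===== SOURCE B (Python) =====
-- def solution(X, Y):
--     xs = sorted(X)
--     ys = sorted(Y)
--     i = j = 0
--     common = []
--     while i < len(xs) and j < len(ys):
--         if xs[i] == ys[j]:
--             common.append(xs[i])
--             i += 1
--             j += 1
--         elif xs[i] < ys[j]:
--             i += 1
--         else:
--             j += 1
--     if not common:
--         return '-1'
--     if all(c == '0' for c in common):
--         return '0'
--     return ''.join(reversed(common))
-- ===== Notes on version B (the rewrite author's own statement) =====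
-- stated objective: alternative
-- what changed: Replaced the two frequency dictionaries plus a final descending sort by a sort of each input followed by a two-pointer merge that emits the multiset intersection already in order, then reverses it.
import Mathlib
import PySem

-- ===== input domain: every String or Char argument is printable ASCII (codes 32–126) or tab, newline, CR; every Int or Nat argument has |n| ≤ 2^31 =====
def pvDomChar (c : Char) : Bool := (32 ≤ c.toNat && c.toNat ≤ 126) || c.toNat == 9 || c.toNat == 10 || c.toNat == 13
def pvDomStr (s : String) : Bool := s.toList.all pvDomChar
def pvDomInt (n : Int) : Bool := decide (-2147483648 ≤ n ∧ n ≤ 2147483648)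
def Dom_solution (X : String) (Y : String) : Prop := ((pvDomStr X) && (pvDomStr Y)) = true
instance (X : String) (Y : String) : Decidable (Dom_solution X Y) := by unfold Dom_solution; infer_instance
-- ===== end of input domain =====

-- B replaces A's two frequency dictionaries + final descending sort by sort-each-input
-- and a two-pointer merge producing the common multiset in ascending order (alternative decomposition, similar cost).


-- ===== PORT A =====
-- get_dictionary(nums): dic.get(num) is truthy iff the key is present with a non-zero count
def pvGetDict (nums : List Char) : PySem.Dict Char Int :=
  nums.foldl (fun d num =>
    match d.get? num with
    | some v => if v ≠ 0 then d.insert num (v + 1) else d.insert num 1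
    | none => d.insert num 1) PySem.Dict.empty

def solution (X : String) (Y : String) : String :=
  let dicX := pvGetDict X.toList
  let dicY := pvGetDict Y.toList
  -- for x in dic_x.keys(): if dic_y.get(x) and dic_y[x] > 0: answer.extend(min(dic_y[x], dic_x[x]) * [x]); answer_set.add(x)
  -- (dic_y[x] / dic_x[x] ported as getD _ 0: both keys are present whenever the guard holds)
  let st := dicX.keys.foldl (fun (st : List Char × PySem.Set Char) x =>
      if ((match dicY.get? x with | some v => decide (v ≠ 0) | none => false)
            && decide (dicY.getD x 0 > 0)) then
        (st.1 ++ List.replicate (min (dicY.getD x 0) (dicX.getD x 0)).toNat x, PySem.Set.add st.2 x)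
      else st) ([], PySem.Set.empty)
  if st.1 = [] then "-1"
  -- len(answer_set) == 1 and list(answer_set)[0] == '0': with exactly one element the iteration order is irrelevant
  else if st.2.length = 1 ∧ st.2[0]? = some '0' then "0"
  else String.ofList (PySem.List.sorted st.1 (fun c => c) true)

-- ===== PORT B =====
-- the two-pointer merge: equal heads emit one copy, otherwise drop the smaller head
def pvMerge : List Char → List Char → List Char
  | [], _ => []
  | _ :: _, [] => []
  | a :: as, b :: bs =>
    if a = b then a :: pvMerge as bs
    else if a < b then pvMerge as (b :: bs)
    else pvMerge (a :: as) bs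
termination_by l r => l.length + r.length
decreasing_by all_goals simp <;> omega

def solution_alt (X : String) (Y : String) : String :=
  let common := pvMerge (PySem.List.sorted X.toList (fun c => c) false)
                        (PySem.List.sorted Y.toList (fun c => c) false)
  if common = [] then "-1"
  else if common.all (fun c => decide (c = '0')) then "0"
  else String.ofList common.reverse

-- ===== PRECONDITION & SPEC =====
def Spec_solution (X : String) (Y : String) (out : String) : Prop := out = solution_alt X Y
instance (X : String) (Y : String) (out : String) : Decidable (Spec_solution X Y out) := by unfold Spec_solution; infer_instance

-- ===== CLAIM (what is proved, stated in full; the proofs are below) =====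
def Claim_equal_solution : Prop := ∀ (X : String) (Y : String), Dom_solution X Y → Spec_solution X Y (solution X Y)

-- ===== LEMMAS AND PROOFS =====

-- A's counting loop builds exactly collections.Counter (all stored counts are positive)
theorem pv_getDict_aux : ∀ (xs : List Char) (d : PySem.Dict Char Int),
    (∀ k v, d.get? k = some v → 0 < v) →
    xs.foldl (fun d num =>
      match d.get? num with
      | some v => if v ≠ 0 then d.insert num (v + 1) else d.insert num 1
      | none => d.insert num 1) d
    = xs.foldl (fun d x => d.modify x 0 (fun v => v + 1)) d := by
  intro xs
  induction xs with
  | nil => intro d _; rfl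
  | cons x xs ih =>
    intro d hinv
    simp only [List.foldl_cons]
    have hstep : (match d.get? x with
        | some v => if v ≠ 0 then d.insert x (v + 1) else d.insert x 1
        | none => d.insert x 1) = d.modify x 0 (fun v => v + 1) := by
      rcases hg : d.get? x with _ | v
      · simp [PySem.Dict.modify, PySem.Dict.getD, hg]
      · have hv := hinv x v hg
        have hz : v ≠ 0 := by omega
        simp only [PySem.Dict.modify, PySem.Dict.getD, hg, Option.getD_some, if_pos hz]
    rw [hstep]
    apply ih
    intro k v hk
    rw [PySem.Dict.modify] at hk
    by_cases hkx : k = x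
    · subst hkx
      rw [PySem.Dict.get?_insert_self] at hk
      rcases hg : d.get? k with _ | w
      · simp [PySem.Dict.getD, hg] at hk; omega
      · have := hinv k w hg
        simp [PySem.Dict.getD, hg] at hk; omega
    · rw [PySem.Dict.get?_insert_of_ne _ _ hkx] at hk
      exact hinv k v hk

theorem pvGetDict_eq_counter (xs : List Char) : pvGetDict xs = PySem.Dict.counter xs := by
  rw [pvGetDict, PySem.Dict.counter_eq_foldl]
  exact pv_getDict_aux xs PySem.Dict.empty (by intro k v h; rw [PySem.Dict.get?_empty] at h; cases h)

-- A's emission loop over nodup keys, accumulator generalized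
theorem pv_foldl_loop (p : Char → Bool) (n : Char → Nat) (ks : List Char) :
    ∀ (ans : List Char) (s : PySem.Set Char), ks.Nodup → (∀ x ∈ ks, x ∉ s) →
    List.foldl (fun (st : List Char × PySem.Set Char) x =>
        if p x then (st.1 ++ List.replicate (n x) x, PySem.Set.add st.2 x) else st) (ans, s) ks
      = (ans ++ ks.flatMap (fun x => if p x then List.replicate (n x) x else []), s ++ ks.filter p) := by
  induction ks with
  | nil => intro ans s _ _; simp
  | cons k ks ih =>
    intro ans s hnd hs
    obtain ⟨hk, hnd'⟩ := List.nodup_cons.mp hnd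
    simp only [List.foldl_cons, List.flatMap_cons, List.filter_cons]
    by_cases hp : p k
    · have hsk : k ∉ s := hs k (by simp)
      have hadd : PySem.Set.add s k = s ++ [k] := by
        simp [PySem.Set.add, hsk]
      rw [if_pos hp, hadd, ih (ans ++ List.replicate (n k) k) (s ++ [k]) hnd' ?_]
      · simp [hp]
      · intro x hx
        have h1 : x ∉ s := hs x (by simp [hx])
        have h2 : x ≠ k := fun h => hk (h ▸ hx)
        simp [h1, h2]
    · rw [if_neg hp, ih ans s hnd' (fun x hx => hs x (by simp [hx]))]
      simp [hp]

-- counting in the emitted list (keys nodup)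
theorem pv_count_flatMap (p : Char → Bool) (n : Char → Nat) (ks : List Char) (hnd : ks.Nodup) (c : Char) :
    (ks.flatMap (fun x => if p x then List.replicate (n x) x else [])).count c
      = if c ∈ ks ∧ p c then n c else 0 := by
  induction ks with
  | nil => simp
  | cons k ks ih =>
    obtain ⟨hk, hnd'⟩ := List.nodup_cons.mp hnd
    rw [List.flatMap_cons, List.count_append, ih hnd']
    by_cases hck : c = k
    · subst hck
      by_cases hp : p c
      · simp [hp, hk]
      · simp [hp, hk]
    · have hck' : ¬ (k = c) := fun h => hck h.symm
      by_cases hp : p k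
      · simp [hp, List.count_replicate, hck', hck, List.mem_cons]
      · simp [hp, hck, List.mem_cons]

-- the guard of A's loop holds exactly on the characters of Y
theorem pv_pred_iff (cy : List Char) (x : Char) :
    (((match (PySem.Dict.counter cy).get? x with | some v => decide (v ≠ 0) | none => false)
        && decide ((PySem.Dict.counter cy).getD x 0 > 0)) = true) ↔ x ∈ cy := by
  have hD := PySem.Dict.getD_counter cy x
  constructor
  · intro h
    rcases hg : (PySem.Dict.counter cy).get? x with _ | v
    · simp [hg] at h
    · have hc : (PySem.Dict.counter cy).contains x = true := by
        rw [PySem.Dict.contains_eq_isSome_get?, hg]; rfl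
      rw [PySem.Dict.contains_counter] at hc
      simpa using hc
  · intro h
    have hc : (PySem.Dict.counter cy).contains x = true := by
      rw [PySem.Dict.contains_counter]; simpa using h
    rw [PySem.Dict.contains_eq_isSome_get?] at hc
    rcases hg : (PySem.Dict.counter cy).get? x with _ | v
    · rw [hg] at hc; simp at hc
    · have hv : v = (cy.count x : Int) := by
        rw [PySem.Dict.getD, hg] at hD; simpa using hD
      have hpos : 0 < cy.count x := List.count_pos_iff.mpr h
      rw [PySem.Dict.getD, hg]
      simp only [Option.getD_some, Bool.and_eq_true, decide_eq_true_eq, ne_eq, gt_iff_lt]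
      refine ⟨by omega, by omega⟩

-- counts in A's answer: min of the two character counts
theorem pv_answer_count (cx cy : List Char) (c : Char) :
    ((PySem.Set.ofList cx).flatMap (fun x =>
        if ((match (PySem.Dict.counter cy).get? x with | some v => decide (v ≠ 0) | none => false)
              && decide ((PySem.Dict.counter cy).getD x 0 > 0)) then
          List.replicate (min ((PySem.Dict.counter cy).getD x 0) ((PySem.Dict.counter cx).getD x 0)).toNat x
        else [])).count c
      = min (cx.count c) (cy.count c) := by
  rw [pv_count_flatMap _ _ _ (PySem.Set.nodup_ofList cx) c]
  by_cases hx : c ∈ cx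
  · by_cases hy : c ∈ cy
    · rw [if_pos ⟨(PySem.Set.mem_ofList cx c).mpr hx, (pv_pred_iff cy c).mpr hy⟩]
      rw [PySem.Dict.getD_counter, PySem.Dict.getD_counter]
      omega
    · rw [if_neg (fun h => hy ((pv_pred_iff cy c).mp h.2))]
      have : cy.count c = 0 := List.count_eq_zero.mpr hy
      omega
  · rw [if_neg (fun h => hx ((PySem.Set.mem_ofList cx c).mp h.1))]
    have : cx.count c = 0 := List.count_eq_zero.mpr hx
    omega

-- every element of the merge comes from the left list
theorem pv_mem_merge (c : Char) : ∀ (as bs : List Char), c ∈ pvMerge as bs → c ∈ as := by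
  intro as bs
  fun_induction pvMerge as bs with
  | case1 => simp
  | case2 => simp
  | case3 as a bs ih =>
    intro hm
    rcases List.mem_cons.mp hm with h1 | h1
    · simp [h1]
    · exact List.mem_cons_of_mem _ (ih h1)
  | case4 a as b bs hne hlt ih =>
    intro hm
    exact List.mem_cons_of_mem _ (ih hm)
  | case5 a as b bs hne hnlt ih =>
    exact ih

-- the merge of two ascending lists is ascending
theorem pv_merge_pairwise : ∀ (as bs : List Char), as.Pairwise (· ≤ ·) → bs.Pairwise (· ≤ ·) →
    (pvMerge as bs).Pairwise (· ≤ ·) := by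
  intro as bs
  fun_induction pvMerge as bs with
  | case1 => intro _ _; simp
  | case2 => intro _ _; simp
  | case3 as a bs ih =>
    intro ha hb
    obtain ⟨ha1, ha2⟩ := List.pairwise_cons.mp ha
    obtain ⟨hb1, hb2⟩ := List.pairwise_cons.mp hb
    refine List.pairwise_cons.mpr ⟨?_, ih ha2 hb2⟩
    intro y hy
    exact ha1 y (pv_mem_merge y as bs hy)
  | case4 a as b bs hne hlt ih =>
    intro ha hb
    exact ih (List.pairwise_cons.mp ha).2 hb
  | case5 a as b bs hne hnlt ih =>
    intro ha hb
    exact ih ha (List.pairwise_cons.mp hb).2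

-- counts in the merge of two ascending lists: the min of the two counts
theorem pv_merge_count : ∀ (as bs : List Char), as.Pairwise (· ≤ ·) → bs.Pairwise (· ≤ ·) →
    ∀ c, (pvMerge as bs).count c = min (as.count c) (bs.count c) := by
  intro as bs
  fun_induction pvMerge as bs with
  | case1 => intro _ _ c; simp
  | case2 => intro _ _ c; simp
  | case3 as a bs ih =>
    intro ha hb c
    have hih := ih (List.pairwise_cons.mp ha).2 (List.pairwise_cons.mp hb).2 c
    simp only [List.count_cons, hih]
    by_cases hca : a = c <;> simp [hca]
  | case4 a as b bs hne hlt ih =>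
    intro ha hb c
    rw [ih (List.pairwise_cons.mp ha).2 hb c]
    by_cases hca : a = c
    · subst hca
      have hnb : a ∉ b :: bs := by
        intro hmem
        rcases List.mem_cons.mp hmem with h | h
        · exact hne h
        · exact absurd (lt_of_lt_of_le hlt ((List.pairwise_cons.mp hb).1 a h)) (lt_irrefl a)
      have h0 : (b :: bs).count a = 0 := List.count_eq_zero.mpr hnb
      simp [h0]
    · simp [List.count_cons, hca]
  | case5 a as b bs hne hnlt ih =>
    intro ha hb c
    rw [ih ha (List.pairwise_cons.mp hb).2 c]
    have hba : b < a := lt_of_le_of_ne (not_lt.mp hnlt) (fun h => hne h.symm)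
    by_cases hcb : b = c
    · subst hcb
      have hna : b ∉ a :: as := by
        intro hmem
        rcases List.mem_cons.mp hmem with h | h
        · exact hne h.symm
        · exact absurd (lt_of_lt_of_le hba ((List.pairwise_cons.mp ha).1 b h)) (lt_irrefl b)
      have h0 : (a :: as).count b = 0 := List.count_eq_zero.mpr hna
      simp [h0]
    · simp [List.count_cons, hcb]

-- a nodup nonempty list all of whose elements equal z is [z]
theorem pv_nodup_all_eq {l : List Char} {z : Char} (hnd : l.Nodup) (hne : l ≠ [])
    (hall : ∀ c ∈ l, c = z) : l = [z] := by
  match l with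
  | [] => exact absurd rfl hne
  | a :: t =>
    have ha : a = z := hall a (by simp)
    match t with
    | [] => rw [ha]
    | b :: t2 =>
      have hb : b = z := hall b (by simp)
      exfalso
      exact (List.nodup_cons.mp hnd).1 (by rw [ha, ← hb]; simp)

-- a list of length 1 whose first entry is '0' is exactly ['0']
theorem pv_singleton_iff (l : List Char) :
    (l.length = 1 ∧ l[0]? = some '0') ↔ l = ['0'] := by
  match l with
  | [] => simp
  | [a] => simp
  | a :: b :: t => simp

theorem solution_eq_alt (X Y : String) : solution X Y = solution_alt X Y := by
  unfold solution solution_alt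
  simp only [pvGetDict_eq_counter, PySem.Dict.keys_counter]
  rw [pv_foldl_loop _ _ _ [] PySem.Set.empty (PySem.Set.nodup_ofList _)
      (by intro x hx; simp [PySem.Set.empty])]
  simp only [PySem.Set.empty, List.nil_append]
  set cx := X.toList with hcx
  set cy := Y.toList with hcy
  set sx := PySem.List.sorted cx (fun c => c) false with hsx
  set sy := PySem.List.sorted cy (fun c => c) false with hsy
  set m := pvMerge sx sy with hm
  set answer := (PySem.Set.ofList cx).flatMap (fun x =>
      if ((match (PySem.Dict.counter cy).get? x with | some v => decide (v ≠ 0) | none => false)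
            && decide ((PySem.Dict.counter cy).getD x 0 > 0)) then
        List.replicate (min ((PySem.Dict.counter cy).getD x 0) ((PySem.Dict.counter cx).getD x 0)).toNat x
      else []) with hans
  set fl := (PySem.Set.ofList cx).filter (fun x =>
      ((match (PySem.Dict.counter cy).get? x with | some v => decide (v ≠ 0) | none => false)
            && decide ((PySem.Dict.counter cy).getD x 0 > 0))) with hfl
  -- counts
  have hpx : sx.Pairwise (· ≤ ·) := by
    simpa using PySem.List.sorted_pairwise cx (fun c => c)
  have hpy : sy.Pairwise (· ≤ ·) := by
    simpa using PySem.List.sorted_pairwise cy (fun c => c)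
  have hmc : ∀ c, m.count c = min (cx.count c) (cy.count c) := by
    intro c
    rw [hm, pv_merge_count sx sy hpx hpy c,
        (PySem.List.sorted_perm cx (fun c => c) false).count_eq,
        (PySem.List.sorted_perm cy (fun c => c) false).count_eq]
  have hac : ∀ c, answer.count c = min (cx.count c) (cy.count c) := fun c => pv_answer_count cx cy c
  have hperm : answer.Perm m := List.perm_iff_count.mpr (fun c => by rw [hac c, hmc c])
  -- membership characterizations
  have hmem_m : ∀ c, c ∈ m ↔ (c ∈ cx ∧ c ∈ cy) := by
    intro c
    rw [← List.count_pos_iff (a := c) (l := m), hmc c]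
    constructor
    · intro h
      have h1 : 0 < cx.count c := by omega
      have h2 : 0 < cy.count c := by omega
      exact ⟨List.count_pos_iff.mp h1, List.count_pos_iff.mp h2⟩
    · intro ⟨h1, h2⟩
      have := List.count_pos_iff.mpr h1
      have := List.count_pos_iff.mpr h2
      omega
  have hmem_fl : ∀ c, c ∈ fl ↔ (c ∈ cx ∧ c ∈ cy) := by
    intro c
    rw [hfl, List.mem_filter, PySem.Set.mem_ofList]
    exact and_congr_right (fun _ => pv_pred_iff cy c)
  by_cases hnil : answer = []
  · have hmnil : m = [] := by
      rw [hnil] at hperm; exact hperm.symm.eq_nil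
    rw [if_pos hnil, if_pos hmnil]
  · have hmnil : m ≠ [] := fun h => hnil (by rw [h] at hperm; exact hperm.eq_nil)
    rw [if_neg hnil, if_neg hmnil]
    -- the '0' branch conditions agree
    have hcond : (fl.length = 1 ∧ fl[0]? = some '0') ↔ (m.all (fun c => decide (c = '0')) = true) := by
      rw [pv_singleton_iff fl]
      simp only [List.all_eq_true, decide_eq_true_eq]
      constructor
      · intro hfl0 c hc
        have hcf := (hmem_fl c).mpr ((hmem_m c).mp hc)
        rw [hfl0] at hcf
        simpa using hcf
      · intro hall
        have hne : fl ≠ [] := by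
          obtain ⟨c, hc⟩ := List.exists_mem_of_ne_nil m hmnil
          have hcf : c ∈ fl := (hmem_fl c).mpr ((hmem_m c).mp hc)
          intro h
          rw [h] at hcf
          simp at hcf
        refine pv_nodup_all_eq ?_ hne ?_
        · rw [hfl]
          exact List.Nodup.filter _ (PySem.Set.nodup_ofList cx)
        · intro c hc
          exact hall c ((hmem_m c).mpr ((hmem_fl c).mp hc))
    by_cases hz : m.all (fun c => decide (c = '0')) = true
    · rw [if_pos (hcond.mpr hz), if_pos hz]
    · rw [if_neg (fun h => hz (hcond.mp h)), if_neg hz]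
      -- the sorted-descending answer is the reversed merge
      congr 1
      apply List.Perm.eq_of_pairwise (le := fun a b : Char => b ≤ a)
      · intro a b _ _ h1 h2
        exact le_antisymm h2 h1
      · exact PySem.List.sorted_pairwise_rev answer (fun c => c)
      · exact List.pairwise_reverse.mpr (pv_merge_pairwise sx sy hpx hpy)
      · exact ((PySem.List.sorted_perm answer (fun c => c) true).trans hperm).trans m.reverse_perm.symm

-- ===== VERDICT (by name: the statement is the Claim_ definition above) =====
theorem solution_spec : Claim_equal_solution := by
  intro X Y _
  exact solution_eq_alt X Y
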